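-- pv_equiv track=rewrite | github.com/wagner-austin/API | libs/instrument_io/src/instrument_io/_decoders/pdf.py | _is_float_string
-- ===== SOURCE A (Python) =====
-- def _is_float_string(value: str) -> bool:
--     """Check if string represents a valid float.
--
--     Args:
--         value: String to check.
--
--     Returns:
--         True if string is a valid float.
--     """
--     if not value or value == "." or value == "-":
--         return False
--
--     # Handle negative numbers
--     start_idx = 1 if value[0] == "-" else 0
--
--     # Must have at least one digit
--     has_digit = False
--     has_decimal = False
--
--     for i in range(start_idx, len(value)):
--         char = value[i]
--         if char.isdigit():
--             has_digit = True
--         elif char == ".":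
--             if has_decimal:  # Multiple decimal points
--                 return False
--             has_decimal = True
--         else:
--             return False
--
--     return has_digit and has_decimal
-- ===== SOURCE B (Python) =====
-- def _is_float_string(value: str) -> bool:
--     if not value or value == "." or value == "-":
--         return False
--     body = value[1:] if value[0] == "-" else value
--     if body.count(".") != 1:
--         return False
--     digits = body.replace(".", "")
--     return len(digits) > 0 and all(c.isdigit() for c in digits)
-- ===== Notes on version B (the rewrite author's own statement) =====
-- stated objective: simpler
-- what changed: Replaces A's single stateful scan with flag variables and early returns by separate whole-string passes: count the decimal points, strip them, then check the remainder is non-empty and all digits.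
import Mathlib
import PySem

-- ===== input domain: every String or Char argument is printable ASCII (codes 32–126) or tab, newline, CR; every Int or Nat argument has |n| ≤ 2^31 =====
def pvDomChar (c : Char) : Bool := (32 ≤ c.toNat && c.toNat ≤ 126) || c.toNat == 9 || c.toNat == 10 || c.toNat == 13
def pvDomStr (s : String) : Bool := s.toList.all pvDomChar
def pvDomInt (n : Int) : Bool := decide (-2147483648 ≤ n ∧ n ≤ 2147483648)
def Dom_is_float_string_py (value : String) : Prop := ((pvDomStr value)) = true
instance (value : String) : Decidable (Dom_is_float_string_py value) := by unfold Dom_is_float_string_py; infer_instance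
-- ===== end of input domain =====

-- B replaces A's single stateful scan (flags + early returns) by separate passes:
-- count the dots, strip them, check the rest non-empty and all digits. Objective: simpler.

-- ===== PORT A =====
-- A's for-loop over value[start_idx:]: state (has_digit, has_decimal), early returns become result false
def floatLoopA : List Char → Bool → Bool → Bool
  | [], has_digit, has_decimal => has_digit && has_decimal
  | c :: rest, has_digit, has_decimal =>
    if PySem.Chars.isdigit c then floatLoopA rest true has_decimal
    else if c = '.' then
      if has_decimal then false else floatLoopA rest has_digit true
    else false

def is_float_string_py (value : String) : Bool :=
  if value = "" || value = "." || value = "-" then false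
  else
    let cs := value.toList
    -- start_idx = 1 if value[0] == '-' else 0 : loop runs over the corresponding suffix
    let body := if cs.head? = some '-' then cs.tail else cs
    floatLoopA body false false

-- ===== PORT B =====
def is_float_string_py_alt (value : String) : Bool :=
  if value = "" || value = "." || value = "-" then false
  else
    let cs := value.toList
    let body := if cs.head? = some '-' then cs.tail else cs
    if body.count '.' ≠ 1 then false
    else
      -- body.replace(".", "") drops every '.'
      let digits := body.filter (fun c => c ≠ '.')
      decide (digits.length > 0) && digits.all PySem.Chars.isdigit

-- ===== PRECONDITION & SPEC =====
def Spec_is_float_string_py (value : String) (out : Bool) : Prop := out = is_float_string_py_alt value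
instance (value : String) (out : Bool) : Decidable (Spec_is_float_string_py value out) := by unfold Spec_is_float_string_py; infer_instance

-- ===== CLAIM (what is proved, stated in full; the proofs are below) =====
def Claim_equal_is_float_string_py : Prop := ∀ (value : String), Dom_is_float_string_py value → Spec_is_float_string_py value (is_float_string_py value)

-- ===== LEMMAS AND PROOFS =====

-- closed form of A's loop: every char digit-or-dot, total dot count (incl. incoming flag) exactly 1, some digit seen
lemma floatLoopA_eq (l : List Char) (hd hdec : Bool) :
    floatLoopA l hd hdec =
      ((l.all fun c => PySem.Chars.isdigit c || c = '.') &&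
       decide (l.count '.' + (if hdec then 1 else 0) = 1) &&
       (hd || l.any PySem.Chars.isdigit)) := by
  induction l generalizing hd hdec with
  | nil =>
    cases hd <;> cases hdec <;> simp [floatLoopA]
  | cons c rest ih =>
    by_cases hdig : PySem.Chars.isdigit c
    · have hne : c ≠ '.' := by rintro rfl; simp [PySem.Chars.isdigit] at hdig
      simp [floatLoopA, hdig, ih, hne]
    · by_cases hdot : c = '.'
      · subst hdot
        cases hdec with
        | true => simp [floatLoopA, hdig]
        | false => simp [floatLoopA, hdig, ih]
      · simp [floatLoopA, hdig, hdot]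

-- the two closed forms agree on any char list
lemma body_eq (l : List Char) :
    floatLoopA l false false =
      (if l.count '.' ≠ 1 then false
       else
         decide ((l.filter (fun c => c ≠ '.')).length > 0) &&
           (l.filter (fun c => c ≠ '.')).all PySem.Chars.isdigit) := by
  rw [floatLoopA_eq]
  by_cases hcnt : l.count '.' = 1
  · simp only [hcnt, if_neg (by omega : ¬ (1 : ℕ) ≠ 1)]
    simp only [Bool.false_or]
    simp only [if_neg (by simp : ¬ (false = true))]
    apply Bool.eq_iff_iff.mpr
    simp only [Bool.and_eq_true, List.all_eq_true, List.any_eq_true,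
      List.mem_filter, decide_eq_true_eq, Bool.or_eq_true, gt_iff_lt, List.length_pos_iff,
      ne_eq, List.filter_eq_nil_iff, not_forall]
    constructor
    · rintro ⟨⟨hall, -⟩, x, hx, hxd⟩
      have hxne : x ≠ '.' := fun h => by subst h; simp [PySem.Chars.isdigit] at hxd
      refine ⟨⟨x, hx, by simp [hxne]⟩, fun c hc => ?_⟩
      rcases hc with ⟨hcl, hcne⟩
      rcases hall c hcl with h | h
      · exact h
      · exact absurd h hcne
    · rintro ⟨⟨x, hxl, hxne⟩, hall⟩
      have hxne' : x ≠ '.' := by simpa using hxne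
      refine ⟨⟨fun c hc => ?_, trivial⟩, x, hxl, hall x ⟨hxl, hxne'⟩⟩
      by_cases h : c = '.'
      · right; exact h
      · left; exact hall c ⟨hc, h⟩
  · simp only [if_pos hcnt]
    have hz : decide ((l.count '.' + if (false : Bool) = true then 1 else 0) = 1) = false := by
      simp; omega
    simp only [hz, Bool.and_false, Bool.false_and]

-- ===== VERDICT (by name: the statement is the Claim_ definition above) =====
theorem is_float_string_py_spec : Claim_equal_is_float_string_py := by
  intro value _
  unfold Spec_is_float_string_py is_float_string_py is_float_string_py_alt
  by_cases hguard : value = "" || value = "." || value = "-"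
  · simp [hguard]
  · simp only [hguard, Bool.false_eq_true, if_false]
    exact body_eq _
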